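-- pv_equiv track=rewrite | github.com/Bob-blip-boop/DUO-Feature-Importance | DUO_imp.py | get_func_labels
-- ===== SOURCE A (Python) =====
-- def get_func_labels(x, fnc):
--     y = []
--     new_x = []
--
--     #! Original function 1
--     if fnc == 1:
--         for i in x:
--             if i[2] < 20 and (i[7] > 10):
--                 y.append(1)
--             elif i[2] >= 40 and (i[7] > 20):
--                 y.append(1)
--             else:
--                 y.append(0)
--
--     #! Original function 2
--     elif fnc == 2:
--         for i in x:
--             if (i[2] < 40) and (i[0] >= 50000) and (i[0] <= 100000):
--                 y.append(1)
--             elif (i[2] >= 40) and (i[2] < 60) and (i[0] >= 75000) and (i[0] <= 125000):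
--                 y.append(1)
--             elif (i[2] >= 60) and (i[0] >= 25000) and (i[0] <= 75000):
--                 y.append(1)
--             else:
--                 y.append(0)
--
--
--     #! Original function 3
--     elif fnc == 3:
--         for i in x:
--             if (i[2] < 40) and (i[3] >= 0) and (i[3] <= 1):
--                 y.append(1)
--             elif (i[2] >= 40) and (i[2] < 60) and (i[3] >= 1) and (i[3] <= 3):
--                 y.append(1)
--             elif (i[2] >= 60) and (i[3] >= 2) and (i[3] <= 4):
--                 y.append(1)
--             else:
--                 y.append(0)
--
--     #! Important "age" and 'hyears' Feature value Shift
--     elif fnc == 11: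
--         for i in x:
--             if i[2] < 40 and (i[7] > 5):
--                 y.append(1)
--             elif i[2] >= 60 and (i[7] > 10):
--                 y.append(1)
--             else:
--                 y.append(0)
--
--     #! Important "salary" and Unimportant "elevel" Feature Shift
--     elif fnc == 12:
--         for i in x:
--             if (i[2] < 40) and (i[0] >= 25000) and (i[0] <= 10000):
--                 y.append(1)
--             elif (i[2] >= 40) and (i[2] < 60) and (i[0] >= 100000) and (i[0] <= 125000):
--                 y.append(1)
--             elif (i[2] >= 60) and (i[0] >= 50000) and (i[0] <= 100000):
--                 y.append(1)
--             else:
--                 y.append(0)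
--
--             new_i = []
--             for j in range(len(i)):
--                 if j == 3 :
--                     new_i.append(i[j]+10)
--                 else:
--                     new_i.append(i[j])
--             new_x.append(new_i)
--         return new_x, y
--
--     #! Unimportant "salary", "commission", "loan" Feature Shift
--     elif fnc == 13:
--         for i in x:
--             if (i[2] < 40) and (i[3] >= 0) and (i[3] <= 1):
--                 y.append(1)
--             elif (i[2] >= 40) and (i[2] < 60) and (i[3] >= 1) and (i[3] <= 3):
--                 y.append(1)
--             elif (i[2] >= 60) and (i[3] >= 2) and (i[3] <= 4):
--                 y.append(1)
--             else:
--                 y.append(0)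
--
--             new_i = []
--             for j in range(len(i)):
--                 if j == 0 or j == 1 or j == 8:
--                     new_i.append((i[j]+50000)*2)
--                 else:
--                     new_i.append(i[j])
--             new_x.append(new_i)
--         return new_x, y
--
--     return x, y
-- ===== SOURCE B (Python) =====
-- # Data-driven re-implementation: each fnc's logic is a list of numeric interval
-- # rules evaluated by one generic matcher, plus an optional per-index shift table.
-- _RULES = {
--     1:  [(None, 20, 7, 11, None), (40, None, 7, 21, None)],
--     2:  [(None, 40, 0, 50000, 100000), (40, 60, 0, 75000, 125000), (60, None, 0, 25000, 75000)],
--     3:  [(None, 40, 3, 0, 1), (40, 60, 3, 1, 3), (60, None, 3, 2, 4)],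
--     11: [(None, 40, 7, 6, None), (60, None, 7, 11, None)],
--     12: [(None, 40, 0, 25000, 10000), (40, 60, 0, 100000, 125000), (60, None, 0, 50000, 100000)],
--     13: [(None, 40, 3, 0, 1), (40, 60, 3, 1, 3), (60, None, 3, 2, 4)],
-- }
--
-- # fnc -> {index: (addend, multiplier)}: new value = (v + a) * m
-- _SHIFTS = {
--     12: {3: (10, 1)},
--     13: {0: (50000, 2), 1: (50000, 2), 8: (50000, 2)},
-- }
--
-- def _matches(row, rule):
--     lo2, hi2, idx, lo, hi = rule
--     if lo2 is not None and row[2] < lo2: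
--         return False
--     if hi2 is not None and row[2] >= hi2:
--         return False
--     v = row[idx]
--     if lo is not None and v < lo:
--         return False
--     if hi is not None and v > hi:
--         return False
--     return True
--
-- def get_func_labels(x, fnc):
--     rules = _RULES.get(fnc)
--     if rules is None:
--         return x, []
--     y = [1 if any(_matches(row, rule) for rule in rules) else 0 for row in x]
--     shift = _SHIFTS.get(fnc)
--     if shift is None:
--         return x, y
--     new_x = [[(v + shift[j][0]) * shift[j][1] if j in shift else v
--               for j, v in enumerate(row)] for row in x]
--     return new_x, y
-- ===== Notes on version B (the rewrite author's own statement) =====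
-- stated objective: simpler
-- what changed: Replaces the six copy-pasted hard-coded branch loops by a data-driven interpreter: per-fnc lists of numeric interval rules (band on index 2 plus a bounded value at a rule-given index) evaluated by one generic matcher, and an optional per-index (addend, multiplier) shift table applied generically.
import Mathlib
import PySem

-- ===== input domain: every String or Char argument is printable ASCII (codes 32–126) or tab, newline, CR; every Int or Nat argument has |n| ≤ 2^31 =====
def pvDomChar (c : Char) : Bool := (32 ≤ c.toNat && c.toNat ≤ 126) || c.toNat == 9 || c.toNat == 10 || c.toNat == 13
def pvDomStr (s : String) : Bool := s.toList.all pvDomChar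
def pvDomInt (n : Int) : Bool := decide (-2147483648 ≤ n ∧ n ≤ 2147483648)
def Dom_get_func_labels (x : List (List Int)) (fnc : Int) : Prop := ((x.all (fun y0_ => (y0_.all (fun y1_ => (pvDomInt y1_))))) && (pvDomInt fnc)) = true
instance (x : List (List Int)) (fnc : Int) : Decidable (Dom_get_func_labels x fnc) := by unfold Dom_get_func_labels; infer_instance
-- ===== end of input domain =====

-- B replaces A's six hard-coded branch loops by a data-driven interpreter: a table of numeric
-- interval rules per fnc evaluated by one generic matcher, plus a per-index shift table (objective: simpler).

-- ===== PORT A =====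
-- A's big if/elif chain, each branch a loop appending 1/0 to y (fnc 12/13 also build new_x row by row).
def get_func_labels (x : List (List Int)) (fnc : Int) : List (List Int) × List Int :=
  if fnc = 1 then
    (x, x.foldl (fun y i =>
      if PySem.List.pyGetD i 2 0 < 20 ∧ PySem.List.pyGetD i 7 0 > 10 then y ++ [1]
      else if PySem.List.pyGetD i 2 0 ≥ 40 ∧ PySem.List.pyGetD i 7 0 > 20 then y ++ [1]
      else y ++ [0]) [])
  else if fnc = 2 then
    (x, x.foldl (fun y i =>
      if PySem.List.pyGetD i 2 0 < 40 ∧ PySem.List.pyGetD i 0 0 ≥ 50000 ∧ PySem.List.pyGetD i 0 0 ≤ 100000 then y ++ [1]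
      else if PySem.List.pyGetD i 2 0 ≥ 40 ∧ PySem.List.pyGetD i 2 0 < 60 ∧ PySem.List.pyGetD i 0 0 ≥ 75000 ∧ PySem.List.pyGetD i 0 0 ≤ 125000 then y ++ [1]
      else if PySem.List.pyGetD i 2 0 ≥ 60 ∧ PySem.List.pyGetD i 0 0 ≥ 25000 ∧ PySem.List.pyGetD i 0 0 ≤ 75000 then y ++ [1]
      else y ++ [0]) [])
  else if fnc = 3 then
    (x, x.foldl (fun y i =>
      if PySem.List.pyGetD i 2 0 < 40 ∧ PySem.List.pyGetD i 3 0 ≥ 0 ∧ PySem.List.pyGetD i 3 0 ≤ 1 then y ++ [1]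
      else if PySem.List.pyGetD i 2 0 ≥ 40 ∧ PySem.List.pyGetD i 2 0 < 60 ∧ PySem.List.pyGetD i 3 0 ≥ 1 ∧ PySem.List.pyGetD i 3 0 ≤ 3 then y ++ [1]
      else if PySem.List.pyGetD i 2 0 ≥ 60 ∧ PySem.List.pyGetD i 3 0 ≥ 2 ∧ PySem.List.pyGetD i 3 0 ≤ 4 then y ++ [1]
      else y ++ [0]) [])
  else if fnc = 11 then
    (x, x.foldl (fun y i =>
      if PySem.List.pyGetD i 2 0 < 40 ∧ PySem.List.pyGetD i 7 0 > 5 then y ++ [1]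
      else if PySem.List.pyGetD i 2 0 ≥ 60 ∧ PySem.List.pyGetD i 7 0 > 10 then y ++ [1]
      else y ++ [0]) [])
  else if fnc = 12 then
    let st := x.foldl (fun (acc : List Int × List (List Int)) i =>
      let y :=
        if PySem.List.pyGetD i 2 0 < 40 ∧ PySem.List.pyGetD i 0 0 ≥ 25000 ∧ PySem.List.pyGetD i 0 0 ≤ 10000 then acc.1 ++ [1]
        else if PySem.List.pyGetD i 2 0 ≥ 40 ∧ PySem.List.pyGetD i 2 0 < 60 ∧ PySem.List.pyGetD i 0 0 ≥ 100000 ∧ PySem.List.pyGetD i 0 0 ≤ 125000 then acc.1 ++ [1]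
        else if PySem.List.pyGetD i 2 0 ≥ 60 ∧ PySem.List.pyGetD i 0 0 ≥ 50000 ∧ PySem.List.pyGetD i 0 0 ≤ 100000 then acc.1 ++ [1]
        else acc.1 ++ [0]
      let new_i := (PySem.List.pyRange 0 (i.length : Int) 1).foldl (fun ni j =>
        if j = 3 then ni ++ [PySem.List.pyGetD i j 0 + 10] else ni ++ [PySem.List.pyGetD i j 0]) []
      (y, acc.2 ++ [new_i])) ([], [])
    (st.2, st.1)
  else if fnc = 13 then
    let st := x.foldl (fun (acc : List Int × List (List Int)) i =>
      let y :=
        if PySem.List.pyGetD i 2 0 < 40 ∧ PySem.List.pyGetD i 3 0 ≥ 0 ∧ PySem.List.pyGetD i 3 0 ≤ 1 then acc.1 ++ [1]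
        else if PySem.List.pyGetD i 2 0 ≥ 40 ∧ PySem.List.pyGetD i 2 0 < 60 ∧ PySem.List.pyGetD i 3 0 ≥ 1 ∧ PySem.List.pyGetD i 3 0 ≤ 3 then acc.1 ++ [1]
        else if PySem.List.pyGetD i 2 0 ≥ 60 ∧ PySem.List.pyGetD i 3 0 ≥ 2 ∧ PySem.List.pyGetD i 3 0 ≤ 4 then acc.1 ++ [1]
        else acc.1 ++ [0]
      let new_i := (PySem.List.pyRange 0 (i.length : Int) 1).foldl (fun ni j =>
        if j = 0 ∨ j = 1 ∨ j = 8 then ni ++ [(PySem.List.pyGetD i j 0 + 50000) * 2] else ni ++ [PySem.List.pyGetD i j 0]) []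
      (y, acc.2 ++ [new_i])) ([], [])
    (st.2, st.1)
  else
    (x, [])

-- ===== PORT B =====
-- A rule is (lo2, hi2, idx, lo, hi): lo2 ≤ row[2] < hi2 and lo ≤ row[idx] ≤ hi (None = unbounded).
-- _matches, transliterated: each early 'return False' is one conjunct.
def pvMatches (row : List Int)
    (rule : Option Int × Option Int × Int × Option Int × Option Int) : Bool :=
  let (lo2, hi2, idx, lo, hi) := rule
  (match lo2 with | none => true | some b => decide (b ≤ PySem.List.pyGetD row 2 0)) &&
  (match hi2 with | none => true | some b => decide (PySem.List.pyGetD row 2 0 < b)) &&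
  (let v := PySem.List.pyGetD row idx 0
   (match lo with | none => true | some b => decide (b ≤ v)) &&
   (match hi with | none => true | some b => decide (v ≤ b)))

def pvRules (fnc : Int) :
    Option (List (Option Int × Option Int × Int × Option Int × Option Int)) :=
  if fnc = 1 then some [(none, some 20, 7, some 11, none), (some 40, none, 7, some 21, none)]
  else if fnc = 2 then some [(none, some 40, 0, some 50000, some 100000),
    (some 40, some 60, 0, some 75000, some 125000), (some 60, none, 0, some 25000, some 75000)]
  else if fnc = 3 then some [(none, some 40, 3, some 0, some 1),
    (some 40, some 60, 3, some 1, some 3), (some 60, none, 3, some 2, some 4)]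
  else if fnc = 11 then some [(none, some 40, 7, some 6, none), (some 60, none, 7, some 11, none)]
  else if fnc = 12 then some [(none, some 40, 0, some 25000, some 10000),
    (some 40, some 60, 0, some 100000, some 125000), (some 60, none, 0, some 50000, some 100000)]
  else if fnc = 13 then some [(none, some 40, 3, some 0, some 1),
    (some 40, some 60, 3, some 1, some 3), (some 60, none, 3, some 2, some 4)]
  else none

-- fnc -> {index: (addend, multiplier)}: new value = (v + a) * m
def pvShifts (fnc : Int) : Option (PySem.Dict Int (Int × Int)) :=
  if fnc = 12 then some (PySem.Dict.ofList [(3, (10, 1))])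
  else if fnc = 13 then some (PySem.Dict.ofList [(0, (50000, 2)), (1, (50000, 2)), (8, (50000, 2))])
  else none

def get_func_labels_alt (x : List (List Int)) (fnc : Int) : List (List Int) × List Int :=
  match pvRules fnc with
  | none => (x, [])
  | some rules =>
    let y := x.map (fun row => if rules.any (pvMatches row) then (1 : Int) else 0)
    match pvShifts fnc with
    | none => (x, y)
    | some shift =>
      let new_x := x.map (fun row => (PySem.List.enumerate row).map (fun jv =>
        match shift.get? jv.1 with
        | some am => (jv.2 + am.1) * am.2
        | none => jv.2))
      (new_x, y)

-- ===== PRECONDITION & SPEC =====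
-- Pre_ excludes exactly the inputs where Python A hits an IndexError: rows too short for the
-- indices the chosen fnc's branch actually evaluates (short-circuiting spares index 7 for
-- fnc 1/11 when the i[2] tests already fail).
def Pre_get_func_labels (x : List (List Int)) (fnc : Int) : Prop :=
  (fnc = 1 → ∀ r ∈ x, 3 ≤ r.length ∧
    ((PySem.List.pyGetD r 2 0 < 20 ∨ 40 ≤ PySem.List.pyGetD r 2 0) → 8 ≤ r.length)) ∧
  (fnc = 11 → ∀ r ∈ x, 3 ≤ r.length ∧
    ((PySem.List.pyGetD r 2 0 < 40 ∨ 60 ≤ PySem.List.pyGetD r 2 0) → 8 ≤ r.length)) ∧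
  ((fnc = 2 ∨ fnc = 12) → ∀ r ∈ x, 3 ≤ r.length) ∧
  ((fnc = 3 ∨ fnc = 13) → ∀ r ∈ x, 4 ≤ r.length)
instance (x : List (List Int)) (fnc : Int) : Decidable (Pre_get_func_labels x fnc) := by
  unfold Pre_get_func_labels; infer_instance

def pvWitness_get_func_labels : List (List Int) × Int := ([[10, 0, 45, 1, 0, 0, 0, 15]], 1)

def Spec_get_func_labels (x : List (List Int)) (fnc : Int) (out : List (List Int) × List Int) : Prop := out = get_func_labels_alt x fnc
instance (x : List (List Int)) (fnc : Int) (out : List (List Int) × List Int) : Decidable (Spec_get_func_labels x fnc out) := by unfold Spec_get_func_labels; infer_instance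

-- ===== CLAIM (what is proved, stated in full; the proofs are below) =====
def Claim_equal_get_func_labels : Prop := ∀ (x : List (List Int)) (fnc : Int), Dom_get_func_labels x fnc → Pre_get_func_labels x fnc → Spec_get_func_labels x fnc (get_func_labels x fnc)

-- ===== LEMMAS AND PROOFS =====

-- A label loop with two 1-branches equals a map with the disjunction of the two conditions.
theorem pv_foldl_if2 (c1 c2 : List Int → Prop) [DecidablePred c1] [DecidablePred c2]
    (x : List (List Int)) (acc : List Int) :
    x.foldl (fun y i => if c1 i then y ++ [1] else if c2 i then y ++ [1] else y ++ [0]) acc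
      = acc ++ x.map (fun i => if c1 i ∨ c2 i then (1 : Int) else 0) := by
  induction x generalizing acc with
  | nil => simp
  | cons r t ih =>
      simp only [List.foldl_cons, List.map_cons, ih]
      split_ifs with h1 h2 h3 h3 <;> simp_all

-- A label loop with three 1-branches equals a map with the disjunction of the three conditions.
theorem pv_foldl_if3 (c1 c2 c3 : List Int → Prop) [DecidablePred c1] [DecidablePred c2] [DecidablePred c3]
    (x : List (List Int)) (acc : List Int) :
    x.foldl (fun y i => if c1 i then y ++ [1] else if c2 i then y ++ [1] else if c3 i then y ++ [1] else y ++ [0]) acc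
      = acc ++ x.map (fun i => if c1 i ∨ c2 i ∨ c3 i then (1 : Int) else 0) := by
  induction x generalizing acc with
  | nil => simp
  | cons r t ih =>
      simp only [List.foldl_cons, List.map_cons, ih]
      split_ifs with h1 h2 h3 h4 h4 h4 h4 <;> simp_all

-- A's paired (y, new_x) loop for fnc 12/13 equals two maps.
theorem pv_foldl_pair (c1 c2 c3 : List Int → Prop) [DecidablePred c1] [DecidablePred c2] [DecidablePred c3]
    (g : List Int → List Int) (x : List (List Int)) (acc : List Int × List (List Int)) :
    x.foldl (fun acc i =>
        ((if c1 i then acc.1 ++ [1] else if c2 i then acc.1 ++ [1] else if c3 i then acc.1 ++ [1] else acc.1 ++ [0]),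
          acc.2 ++ [g i])) acc
      = (acc.1 ++ x.map (fun i => if c1 i ∨ c2 i ∨ c3 i then (1 : Int) else 0), acc.2 ++ x.map g) := by
  induction x generalizing acc with
  | nil => simp
  | cons r t ih =>
      simp only [List.foldl_cons, List.map_cons, ih]
      split_ifs with h1 h2 h3 h4 h4 h4 h4 <;> simp_all

-- A's inner index loop building new_i equals a map over the same range.
theorem pv_inner_eq (P : Int → Prop) [DecidablePred P] (f : Int → Int) (r : List Int) :
    (PySem.List.pyRange 0 (r.length : Int) 1).foldl (fun ni j =>
        if P j then ni ++ [f (PySem.List.pyGetD r j 0)] else ni ++ [PySem.List.pyGetD r j 0]) []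
      = (PySem.List.pyRange 0 (r.length : Int) 1).map (fun j =>
        if P j then f (PySem.List.pyGetD r j 0) else PySem.List.pyGetD r j 0) := by
  have h : ∀ (l : List Int) (acc : List Int),
      l.foldl (fun ni j => if P j then ni ++ [f (PySem.List.pyGetD r j 0)] else ni ++ [PySem.List.pyGetD r j 0]) acc
        = acc ++ l.map (fun j => if P j then f (PySem.List.pyGetD r j 0) else PySem.List.pyGetD r j 0) := by
    intro l
    induction l with
    | nil => simp
    | cons a t ih =>
        intro acc
        simp only [List.foldl_cons, List.map_cons, ih]
        split_ifs <;> simp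
  simpa using h _ []

-- B's enumerate-based row transform, as a map over the index range.
theorem pv_enum_eq (g : Int → Int → Int) (r : List Int) :
    (PySem.List.enumerate r).map (fun jv => g jv.1 jv.2)
      = (PySem.List.pyRange 0 (r.length : Int) 1).map (fun j => g j (PySem.List.pyGetD r j 0)) := by
  rw [PySem.List.enumerate_eq_map_pyRange r 0]
  simp [Function.comp]

-- ===== VERDICT (by name: the statement is the Claim_ definition above) =====
theorem get_func_labels_spec : Claim_equal_get_func_labels := by
  intro x fnc _ _
  unfold Spec_get_func_labels get_func_labels get_func_labels_alt pvRules pvShifts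
  by_cases h1 : fnc = 1
  · simp only [h1]
    rw [pv_foldl_if2 (fun i => PySem.List.pyGetD i 2 0 < 20 ∧ PySem.List.pyGetD i 7 0 > 10)
        (fun i => PySem.List.pyGetD i 2 0 ≥ 40 ∧ PySem.List.pyGetD i 7 0 > 20)]
    simp only [Int.reduceEq, reduceIte, List.nil_append, Prod.mk.injEq, true_and]
    apply List.map_congr_left; intro r _
    simp [pvMatches]; omega
  · simp only [if_neg h1]
    by_cases h2 : fnc = 2
    · simp only [h2]
      rw [pv_foldl_if3
          (fun i => PySem.List.pyGetD i 2 0 < 40 ∧ PySem.List.pyGetD i 0 0 ≥ 50000 ∧ PySem.List.pyGetD i 0 0 ≤ 100000)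
          (fun i => PySem.List.pyGetD i 2 0 ≥ 40 ∧ PySem.List.pyGetD i 2 0 < 60 ∧ PySem.List.pyGetD i 0 0 ≥ 75000 ∧ PySem.List.pyGetD i 0 0 ≤ 125000)
          (fun i => PySem.List.pyGetD i 2 0 ≥ 60 ∧ PySem.List.pyGetD i 0 0 ≥ 25000 ∧ PySem.List.pyGetD i 0 0 ≤ 75000)]
      simp only [Int.reduceEq, reduceIte, List.nil_append, Prod.mk.injEq, true_and]
      apply List.map_congr_left; intro r _
      simp [pvMatches]; omega
    · simp only [if_neg h2]
      by_cases h3 : fnc = 3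
      · simp only [h3]
        rw [pv_foldl_if3
            (fun i => PySem.List.pyGetD i 2 0 < 40 ∧ PySem.List.pyGetD i 3 0 ≥ 0 ∧ PySem.List.pyGetD i 3 0 ≤ 1)
            (fun i => PySem.List.pyGetD i 2 0 ≥ 40 ∧ PySem.List.pyGetD i 2 0 < 60 ∧ PySem.List.pyGetD i 3 0 ≥ 1 ∧ PySem.List.pyGetD i 3 0 ≤ 3)
            (fun i => PySem.List.pyGetD i 2 0 ≥ 60 ∧ PySem.List.pyGetD i 3 0 ≥ 2 ∧ PySem.List.pyGetD i 3 0 ≤ 4)]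
        simp only [Int.reduceEq, reduceIte, List.nil_append, Prod.mk.injEq, true_and]
        apply List.map_congr_left; intro r _
        simp [pvMatches]; omega
      · simp only [if_neg h3]
        by_cases h11 : fnc = 11
        · simp only [h11]
          rw [pv_foldl_if2 (fun i => PySem.List.pyGetD i 2 0 < 40 ∧ PySem.List.pyGetD i 7 0 > 5)
              (fun i => PySem.List.pyGetD i 2 0 ≥ 60 ∧ PySem.List.pyGetD i 7 0 > 10)]
          simp only [Int.reduceEq, reduceIte, List.nil_append, Prod.mk.injEq, true_and]
          apply List.map_congr_left; intro r _
          simp [pvMatches]; omega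
        · simp only [if_neg h11]
          by_cases h12 : fnc = 12
          · simp only [h12]
            rw [pv_foldl_pair
                (fun i => PySem.List.pyGetD i 2 0 < 40 ∧ PySem.List.pyGetD i 0 0 ≥ 25000 ∧ PySem.List.pyGetD i 0 0 ≤ 10000)
                (fun i => PySem.List.pyGetD i 2 0 ≥ 40 ∧ PySem.List.pyGetD i 2 0 < 60 ∧ PySem.List.pyGetD i 0 0 ≥ 100000 ∧ PySem.List.pyGetD i 0 0 ≤ 125000)
                (fun i => PySem.List.pyGetD i 2 0 ≥ 60 ∧ PySem.List.pyGetD i 0 0 ≥ 50000 ∧ PySem.List.pyGetD i 0 0 ≤ 100000)]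
            simp only [Int.reduceEq, reduceIte, List.nil_append, Prod.mk.injEq]
            constructor
            · apply List.map_congr_left; intro r _
              rw [pv_inner_eq (fun j => j = 3) (fun v => v + 10),
                  pv_enum_eq (fun j v => match (PySem.Dict.ofList [((3:Int), ((10:Int), (1:Int)))]).get? j with
                    | some am => (v + am.1) * am.2 | none => v)]
              apply List.map_congr_left; intro j _
              by_cases hj : j = 3 <;>
                simp [hj, PySem.Dict.ofList, PySem.Dict.update, PySem.Dict.get?_insert,
                  PySem.Dict.get?_empty]
            · apply List.map_congr_left; intro r _
              simp [pvMatches]; omega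
          · simp only [if_neg h12]
            by_cases h13 : fnc = 13
            · simp only [h13]
              rw [pv_foldl_pair
                  (fun i => PySem.List.pyGetD i 2 0 < 40 ∧ PySem.List.pyGetD i 3 0 ≥ 0 ∧ PySem.List.pyGetD i 3 0 ≤ 1)
                  (fun i => PySem.List.pyGetD i 2 0 ≥ 40 ∧ PySem.List.pyGetD i 2 0 < 60 ∧ PySem.List.pyGetD i 3 0 ≥ 1 ∧ PySem.List.pyGetD i 3 0 ≤ 3)
                  (fun i => PySem.List.pyGetD i 2 0 ≥ 60 ∧ PySem.List.pyGetD i 3 0 ≥ 2 ∧ PySem.List.pyGetD i 3 0 ≤ 4)]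
              simp only [reduceIte, List.nil_append, Prod.mk.injEq]
              constructor
              · apply List.map_congr_left; intro r _
                rw [pv_inner_eq (fun j => j = 0 ∨ j = 1 ∨ j = 8) (fun v => (v + 50000) * 2),
                    pv_enum_eq (fun j v => match (PySem.Dict.ofList [((0:Int), ((50000:Int), (2:Int))), (1, (50000, 2)), (8, (50000, 2))]).get? j with
                      | some am => (v + am.1) * am.2 | none => v)]
                apply List.map_congr_left; intro j _
                by_cases hj0 : j = 0 <;> by_cases hj1 : j = 1 <;> by_cases hj8 : j = 8 <;>
                  simp [hj0, hj1, hj8, PySem.Dict.ofList, PySem.Dict.update,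
                    PySem.Dict.get?_insert, PySem.Dict.get?_empty]
              · apply List.map_congr_left; intro r _
                simp [pvMatches]; omega
            · simp [if_neg h13]
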